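-- pv_equiv track=rewrite | github.com/Mateusz-Dobrzynski/logia | solutions/harcerski.py | liczenie_wagi_slowa
-- ===== SOURCE A (Python) =====
-- def liczenie_wagi_litery(litera):
--     alfabet = ["abcdef", "ghijk", "lmnop", "qrstu", "vwxyz"]
--     licznik = 0
--     mianownik = 0
--     for i in range(len(alfabet)):
--         if litera in alfabet[i]:
--             mianownik = i + 1
--             licznik = (alfabet[i].index(litera)) + 1
--     return licznik, mianownik
--
-- def liczenie_wagi_slowa(slowo):
--     licznik_slowa = 0
--     mianownik_slowa = 1
--     for litera in slowo:
--         licznik_litery, mianownik_litery = liczenie_wagi_litery(litera)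
--         licznik_slowa, mianownik_slowa = dodawanie_ulamkow_zwyklych(
--             licznik_litery,
--             mianownik_litery,
--             licznik_slowa,
--             mianownik_slowa,
--         )
--     return licznik_slowa, mianownik_slowa
--
-- def dodawanie_ulamkow_zwyklych(
--     licznik1, mianownik1, licznik2, mianownik2
-- ) -> tuple[int, int]:
--     licznik1 *= mianownik2
--     licznik2 *= mianownik1
--     return licznik1 + licznik2, mianownik1 * mianownik2
-- ===== SOURCE B (Python) =====
-- ALFABET = "abcdefghijklmnopqrstuvwxyz"
--
--
-- def waga_litery(litera):
--     # weight of a letter from its flat alphabet position (group sizes: 6,5,5,5,5)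
--     k = ALFABET.find(litera)
--     if k < 0:
--         return (0, 0)
--     if k < 6:
--         return (k + 1, 1)
--     return ((k - 6) % 5 + 1, (k - 6) // 5 + 2)
--
--
-- def _scal(ps):
--     # combine a nonempty list of unreduced fractions by a balanced tree
--     if len(ps) <= 1:
--         return ps[0]
--     mid = len(ps) // 2
--     n1, d1 = _scal(ps[:mid])
--     n2, d2 = _scal(ps[mid:])
--     return (n1 * d2 + n2 * d1, d1 * d2)
--
--
-- def liczenie_wagi_slowa(slowo):
--     pairs = [waga_litery(litera) for litera in slowo]
--     if not pairs:
--         return (0, 1)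
--     return _scal(pairs)
-- ===== Notes on version B (the rewrite author's own statement) =====
-- stated objective: alternative
-- what changed: Replaces A's left-to-right running fraction-addition loop by (1) an arithmetic decode of each letter's flat alphabet index into its weight and (2) a balanced divide-and-conquer tree that combines the unreduced per-letter fractions pairwise, which is valid because unreduced fraction addition is associative; it trades the linear accumulator loop for a recursive product tree with balanced operands.
import Mathlib
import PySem

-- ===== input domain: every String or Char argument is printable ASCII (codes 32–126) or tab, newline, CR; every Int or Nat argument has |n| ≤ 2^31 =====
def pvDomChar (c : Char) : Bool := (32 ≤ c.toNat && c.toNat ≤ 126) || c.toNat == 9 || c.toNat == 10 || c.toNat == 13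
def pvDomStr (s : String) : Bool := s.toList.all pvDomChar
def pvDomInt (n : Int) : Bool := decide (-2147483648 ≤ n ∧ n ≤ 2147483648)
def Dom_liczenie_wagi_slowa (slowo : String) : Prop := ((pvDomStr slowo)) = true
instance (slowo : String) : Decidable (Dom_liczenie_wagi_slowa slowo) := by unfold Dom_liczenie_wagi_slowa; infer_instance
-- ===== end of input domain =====

-- B replaces A's running fraction-addition loop by an arithmetic decode of each
-- letter's flat alphabet index plus a balanced divide-and-conquer combination of
-- the unreduced fractions (alternative algorithm: a balanced combine tree).

-- ===== PORT A =====
-- Python strings are ported through List Char; 'litera in grp' for the 1-char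
-- litera is exactly char membership, grp.index(litera) is PySem.List.index?
-- (the .getD 0 is only reached when litera ∈ grp, so index? is some).
def liczenie_wagi_litery (litera : Char) : Int × Int :=
  let alfabet : List (List Char) :=
    ["abcdef".toList, "ghijk".toList, "lmnop".toList, "qrstu".toList, "vwxyz".toList]
  (List.range alfabet.length).foldl
    (fun (p : Int × Int) i =>
      let grp := alfabet.getD i []
      if litera ∈ grp then
        ((((PySem.List.index? grp litera).getD 0 : Nat) : Int) + 1, (i : Int) + 1)
      else p)
    (0, 0)

def dodawanie_ulamkow_zwyklych (licznik1 mianownik1 licznik2 mianownik2 : Int) : Int × Int :=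
  (licznik1 * mianownik2 + licznik2 * mianownik1, mianownik1 * mianownik2)

-- the loop body of A's main loop, extracted as a helper
def pvKrokA (st : Int × Int) (litera : Char) : Int × Int :=
  let w := liczenie_wagi_litery litera
  dodawanie_ulamkow_zwyklych w.1 w.2 st.1 st.2

def liczenie_wagi_slowa (slowo : String) : Int × Int :=
  slowo.toList.foldl pvKrokA (0, 1)

-- ===== PORT B =====
-- ALFABET.find(litera) for a single char is PySem.List.index? on the char list
-- (none exactly when absent, matching Python's -1 branch).
def waga_litery (litera : Char) : Int × Int :=
  match PySem.List.index? "abcdefghijklmnopqrstuvwxyz".toList litera with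
  | none => (0, 0)
  | some k =>
    if k < 6 then ((k : Int) + 1, 1)
    else (PySem.Int.mod ((k : Int) - 6) 5 + 1, PySem.Int.floordiv ((k : Int) - 6) 5 + 2)

-- _scal: ps[:mid]/ps[mid:] with 0 ≤ mid ≤ len are take/drop; ps[0] is only
-- reached with ps nonempty (the caller and the recursion guarantee it), where
-- headD (0,0) is exact.
def pvScal (ps : List (Int × Int)) : Int × Int :=
  if ps.length ≤ 1 then ps.headD (0, 0)
  else
    let r1 := pvScal (ps.take (ps.length / 2))
    let r2 := pvScal (ps.drop (ps.length / 2))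
    (r1.1 * r2.2 + r2.1 * r1.2, r1.2 * r2.2)
termination_by ps.length
decreasing_by
  · simp only [List.length_take]; omega
  · simp only [List.length_drop]; omega

def liczenie_wagi_slowa_alt (slowo : String) : Int × Int :=
  let pairs := slowo.toList.map waga_litery
  if pairs = [] then (0, 1)
  else pvScal pairs

-- ===== PRECONDITION & SPEC =====
def Spec_liczenie_wagi_slowa (slowo : String) (out : Int × Int) : Prop := out = liczenie_wagi_slowa_alt slowo
instance (slowo : String) (out : Int × Int) : Decidable (Spec_liczenie_wagi_slowa slowo out) := by unfold Spec_liczenie_wagi_slowa; infer_instance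

-- ===== CLAIM (what is proved, stated in full; the proofs are below) =====
def Claim_equal_liczenie_wagi_slowa : Prop := ∀ (slowo : String), Dom_liczenie_wagi_slowa slowo → Spec_liczenie_wagi_slowa slowo (liczenie_wagi_slowa slowo)

-- ===== LEMMAS AND PROOFS =====

-- product of the denominators
def pvP (xs : List (Int × Int)) : Int := (xs.map Prod.snd).prod

-- unreduced-sum numerator of the list of fractions
def pvS : List (Int × Int) → Int
  | [] => 0
  | p :: t => p.1 * pvP t + p.2 * pvS t

theorem waga_eq (c : Char) : liczenie_wagi_litery c = waga_litery c := by
  rcases h : PySem.List.index? "abcdefghijklmnopqrstuvwxyz".toList c with _ | k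
  · have hc : c ∉ "abcdefghijklmnopqrstuvwxyz".toList :=
      (PySem.List.index?_eq_none_iff _ _).mp h
    rw [show "abcdefghijklmnopqrstuvwxyz".toList =
      ['a','b','c','d','e','f','g','h','i','j','k','l','m','n','o','p','q','r','s','t','u','v','w','x','y','z'] from rfl] at hc
    simp only [List.mem_cons, List.not_mem_nil, or_false, not_or] at hc
    obtain ⟨h1,h2,h3,h4,h5,h6,h7,h8,h9,h10,h11,h12,h13,h14,h15,h16,h17,h18,h19,h20,h21,h22,h23,h24,h25,h26⟩ := hc
    unfold liczenie_wagi_litery waga_litery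
    rw [h]
    simp [List.range_succ,
      show "abcdef".toList = ['a','b','c','d','e','f'] from rfl,
      show "ghijk".toList = ['g','h','i','j','k'] from rfl,
      show "lmnop".toList = ['l','m','n','o','p'] from rfl,
      show "qrstu".toList = ['q','r','s','t','u'] from rfl,
      show "vwxyz".toList = ['v','w','x','y','z'] from rfl,
      h1,h2,h3,h4,h5,h6,h7,h8,h9,h10,h11,h12,h13,h14,h15,h16,h17,h18,h19,h20,h21,h22,h23,h24,h25,h26]
  · obtain ⟨hk, hck, -⟩ := PySem.List.getElem_of_index?_eq_some h
    rw [show ("abcdefghijklmnopqrstuvwxyz".toList).length = 26 from rfl] at hk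
    have hc2 : ("abcdefghijklmnopqrstuvwxyz".toList).getD k ' ' = c := by
      rw [List.getD_eq_getElem _ _ (by simpa using hk)]; exact hck
    clear hck h
    unfold liczenie_wagi_litery waga_litery
    interval_cases k <;> (subst hc2; decide)

theorem pvKrokA_eq (st : Int × Int) (c : Char) :
    pvKrokA st c = ((waga_litery c).1 * st.2 + st.1 * (waga_litery c).2,
                    (waga_litery c).2 * st.2) := by
  simp [pvKrokA, dodawanie_ulamkow_zwyklych, waga_eq]

theorem foldA : ∀ (chars : List Char) (n d : Int),
    chars.foldl pvKrokA (n, d)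
      = (n * pvP (chars.map waga_litery) + d * pvS (chars.map waga_litery),
         d * pvP (chars.map waga_litery)) := by
  intro chars
  induction chars with
  | nil => intro n d; simp [pvP, pvS]
  | cons c t ih =>
    intro n d
    rw [List.foldl_cons, pvKrokA_eq, ih]
    simp only [List.map_cons, pvS, pvP, List.prod_cons, Prod.mk.injEq]
    exact ⟨by ring, by ring⟩

theorem pvP_append (xs ys : List (Int × Int)) : pvP (xs ++ ys) = pvP xs * pvP ys := by
  simp [pvP]

theorem pvS_append (xs ys : List (Int × Int)) :
    pvS (xs ++ ys) = pvS xs * pvP ys + pvP xs * pvS ys := by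
  induction xs with
  | nil => simp [pvS, pvP]
  | cons p t ih =>
    simp only [List.cons_append, pvS, ih, pvP_append]
    simp only [pvP, List.map_cons, List.prod_cons]
    ring

theorem scal_eq : ∀ (n : ℕ) (ps : List (Int × Int)), ps.length = n → ps ≠ [] →
    pvScal ps = (pvS ps, pvP ps) := by
  intro n
  induction n using Nat.strong_induction_on with
  | _ n ih =>
    intro ps hlen hne
    rw [pvScal]
    by_cases h1 : ps.length ≤ 1
    · match ps, hne with
      | [p], _ => simp [pvS, pvP]
      | p :: q :: t, _ => simp at h1
    · rw [if_neg h1]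
      have htake : ps.take (ps.length / 2) ≠ [] := by
        cases ps with
        | nil => simp at hne
        | cons a t => simp at h1 ⊢; omega
      have hdrop : ps.drop (ps.length / 2) ≠ [] := by
        simp only [ne_eq, List.drop_eq_nil_iff]; omega
      rw [ih (ps.take (ps.length / 2)).length (by rw [List.length_take]; omega) _ rfl htake,
          ih (ps.drop (ps.length / 2)).length (by rw [List.length_drop]; omega) _ rfl hdrop]
      have hsplit : ps = ps.take (ps.length / 2) ++ ps.drop (ps.length / 2) :=
        (List.take_append_drop _ ps).symm
      conv_rhs => rw [hsplit]
      rw [pvS_append, pvP_append]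
      simp only [Prod.mk.injEq]
      exact ⟨by ring, trivial⟩

-- ===== VERDICT (by name: the statement is the Claim_ definition above) =====
theorem liczenie_wagi_slowa_spec : Claim_equal_liczenie_wagi_slowa := by
  intro slowo _
  unfold Spec_liczenie_wagi_slowa liczenie_wagi_slowa liczenie_wagi_slowa_alt
  rw [foldA]
  by_cases h : slowo.toList.map waga_litery = []
  · rw [if_pos h, h]; simp [pvS, pvP]
  · rw [if_neg h, scal_eq _ _ rfl h]; simp
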